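-- pv_equiv track=rewrite | github.com/chimera-linux/cports | src/cbuild/apk/util.py | get_namever
-- ===== SOURCE A (Python) =====
-- def get_namever(pkgp):
--     # maybe version dash
--     fdash = pkgp.find("-")
--     # invalid ver (ver should be FOO-VER-rREV)
--     if fdash < 0:
--         return None, None
--     # maybe revision dash
--     sdash = pkgp.find("-", fdash + 1)
--     # invalid ver again
--     if sdash < 0:
--         return None, None
--     # now get rid of any remaining dashes
--     while True:
--         ndash = pkgp.find("-", sdash + 1)
--         if ndash < 0:
--             break
--         fdash = sdash
--         sdash = ndash
--     # and return name/ver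
--     return pkgp[0:fdash], pkgp[fdash + 1 :]
-- ===== SOURCE B (Python) =====
-- def get_namever(pkgp):
--     parts = pkgp.rsplit("-", 2)
--     if len(parts) < 3:
--         return None, None
--     return parts[0], parts[1] + "-" + parts[2]
-- ===== Notes on version B (the rewrite author's own statement) =====
-- stated objective: simpler
-- what changed: Replaced the forward find-loop that tracks the last two dash indices with a single right-side split (rsplit with maxsplit 2), rejoining the last two pieces as the version.
import Mathlib
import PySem

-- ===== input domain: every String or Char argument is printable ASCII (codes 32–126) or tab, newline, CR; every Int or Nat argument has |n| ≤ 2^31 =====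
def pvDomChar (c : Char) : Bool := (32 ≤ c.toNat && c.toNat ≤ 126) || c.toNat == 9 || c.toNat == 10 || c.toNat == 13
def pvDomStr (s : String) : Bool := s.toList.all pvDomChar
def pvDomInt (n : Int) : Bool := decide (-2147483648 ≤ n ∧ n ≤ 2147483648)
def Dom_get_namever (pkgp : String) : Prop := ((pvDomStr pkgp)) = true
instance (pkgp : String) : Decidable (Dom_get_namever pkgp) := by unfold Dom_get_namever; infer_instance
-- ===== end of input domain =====

-- B replaces A's forward dash-tracking find-loop with a single right-side split
-- (rsplit('-', 2)), rejoining the last two pieces as the version: simpler decomposition.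


-- ===== PORT A =====
-- the 'while True' loop of A: advances (fdash, sdash) to the next dash until none remains.
-- Fuel (s.length + 1 at the call site) only makes the recursion total; it is never exhausted,
-- since each iteration strictly increases sdash below s.length.
def getNameverLoop (s : List Char) : Nat → Int → Int → Int × Int
  | 0, fdash, sdash => (fdash, sdash)
  | fuel + 1, fdash, sdash =>
    let ndash := PySem.Chars.findFrom s ['-'] (sdash + 1) none
    if ndash < 0 then (fdash, sdash)
    else getNameverLoop s fuel sdash ndash

def get_namever (pkgp : String) : Option String × Option String :=
  let s := pkgp.toList
  let fdash := PySem.Chars.find s ['-']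
  if fdash < 0 then (none, none)
  else
    let sdash := PySem.Chars.findFrom s ['-'] (fdash + 1) none
    if sdash < 0 then (none, none)
    else
      let fs := getNameverLoop s (s.length + 1) fdash sdash
      (some (String.ofList (PySem.List.slice s (some 0) (some fs.1))),
       some (String.ofList (PySem.List.slice s (some (fs.1 + 1)) none)))

-- ===== PORT B =====
-- hand port of pkgp.rsplit("-", 2) (not in PySem), done as two right-splits at the last '-':
-- splitLastDash s = some (a, b) iff s = a ++ '-' :: b with '-' ∉ b; none iff '-' ∉ s.
def splitLastDash : List Char → Option (List Char × List Char)
  | [] => none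
  | c :: rest =>
    match splitLastDash rest with
    | some (a, b) => some (c :: a, b)
    | none => if c = '-' then some ([], rest) else none

def get_namever_alt (pkgp : String) : Option String × Option String :=
  match splitLastDash pkgp.toList with
  | none => (none, none)
  | some (p, last) =>
    match splitLastDash p with
    | none => (none, none)
    | some (name, mid) =>
      (some (String.ofList name), some (String.ofList (mid ++ '-' :: last)))

-- ===== PRECONDITION & SPEC =====
def Spec_get_namever (pkgp : String) (out : Option String × Option String) : Prop := out = get_namever_alt pkgp
instance (pkgp : String) (out : Option String × Option String) : Decidable (Spec_get_namever pkgp out) := by unfold Spec_get_namever; infer_instance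

-- ===== CLAIM (what is proved, stated in full; the proofs are below) =====
def Claim_equal_get_namever : Prop := ∀ (pkgp : String), Dom_get_namever pkgp → Spec_get_namever pkgp (get_namever pkgp)

-- ===== LEMMAS AND PROOFS =====

-- characterisation of B's right-split
lemma splitLastDash_none {s : List Char} (h : splitLastDash s = none) : '-' ∉ s := by
  induction s with
  | nil => simp
  | cons c rest ih =>
    simp only [splitLastDash] at h
    rcases hr : splitLastDash rest with _ | ⟨a, b⟩ <;> simp only [hr] at h
    · split_ifs at h with hc
      simp only [List.mem_cons, not_or]
      exact ⟨fun hce => hc hce.symm, ih hr⟩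
    · simp at h

lemma splitLastDash_some {s a b : List Char} (h : splitLastDash s = some (a, b)) :
    s = a ++ '-' :: b ∧ '-' ∉ b := by
  induction s generalizing a b with
  | nil => simp [splitLastDash] at h
  | cons c rest ih =>
    simp only [splitLastDash] at h
    rcases hr : splitLastDash rest with _ | ⟨a', b'⟩
    · simp only [hr] at h
      split_ifs at h with hc
      obtain ⟨rfl, rfl⟩ : ([] : List Char) = a ∧ rest = b := by simpa [Prod.ext_iff] using h
      subst hc
      exact ⟨rfl, splitLastDash_none hr⟩
    · simp only [hr] at h
      obtain ⟨rfl, rfl⟩ : c :: a' = a ∧ b' = b := by simpa [Prod.ext_iff] using h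
      obtain ⟨hs, hb⟩ := ih hr
      exact ⟨by simp [hs], hb⟩

-- singleton prefix at an index
lemma singleton_prefix_iff (l : List Char) : ['-'] <+: l ↔ l[0]? = some '-' := by
  cases l with
  | nil => simp
  | cons a t => simp [List.cons_prefix_cons, eq_comm]

-- find points at the unique "first dash"
lemma find_eq_of_first (s : List Char) (j : Nat) (hj : s[j]? = some '-')
    (hmin : ∀ i < j, s[i]? ≠ some '-') : PySem.Chars.find s ['-'] = (j : Int) := by
  have hmem : '-' ∈ s := List.mem_of_getElem? hj
  have hinf : ['-'] <:+: s := (List.singleton_infix_iff '-' s).mpr hmem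
  have h0 : 0 ≤ PySem.Chars.find s ['-'] := (PySem.Chars.find_nonneg_iff ..).mpr hinf
  obtain ⟨hpre, hmin'⟩ := PySem.Chars.find_spec (s := s) (sub := ['-']) h0
  rw [singleton_prefix_iff] at hpre
  rw [List.getElem?_drop, Nat.add_zero] at hpre
  have hjle : j ≤ (PySem.Chars.find s ['-']).toNat := by
    by_contra hlt
    exact hmin _ (by omega) hpre
  have hlej : (PySem.Chars.find s ['-']).toNat ≤ j := by
    by_contra hlt
    exact hmin' j (by omega) ((singleton_prefix_iff _).mpr (by rw [List.getElem?_drop, Nat.add_zero]; exact hj))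
  omega

lemma find_eq_neg_one_of_no (s : List Char) (hno : '-' ∉ s) :
    PySem.Chars.find s ['-'] = -1 :=
  (PySem.Chars.find_eq_neg_one_iff ..).mpr (fun h => hno ((List.singleton_infix_iff '-' s).mp h))

-- findFrom k = the first dash at index ≥ k (k ≤ len)
lemma findFrom_eq_of_first (s : List Char) (k j : Nat) (hk : k ≤ s.length)
    (hkj : k ≤ j) (hj : s[j]? = some '-') (hmin : ∀ i, k ≤ i → i < j → s[i]? ≠ some '-') :
    PySem.Chars.findFrom s ['-'] (k : Int) none = (j : Int) := by
  rw [PySem.Chars.findFrom_natCast s ['-'] k hk]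
  have hfind : PySem.Chars.find (s.drop k) ['-'] = ((j - k : Nat) : Int) := by
    apply find_eq_of_first
    · rw [List.getElem?_drop]; rw [show k + (j - k) = j by omega]; exact hj
    · intro i hi
      rw [List.getElem?_drop]
      exact hmin (k + i) (by omega) (by omega)
  rw [hfind]
  have hne : ((j - k : Nat) : Int) ≠ -1 := by omega
  rw [if_neg hne]
  push_cast [Nat.cast_sub hkj]
  omega

lemma findFrom_eq_neg_one_of_no (s : List Char) (k : Nat) (hk : k ≤ s.length)
    (hno : ∀ j, k ≤ j → s[j]? ≠ some '-') :
    PySem.Chars.findFrom s ['-'] (k : Int) none = -1 := by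
  rw [PySem.Chars.findFrom_natCast s ['-'] k hk]
  have hfind : PySem.Chars.find (s.drop k) ['-'] = -1 := by
    apply find_eq_neg_one_of_no
    intro hm
    obtain ⟨i, hi, hget⟩ := List.getElem_of_mem hm
    exact hno (k + i) (by omega) (by rw [← List.getElem?_drop]; exact List.getElem?_eq_some_iff.mpr ⟨hi, hget⟩)
  rw [hfind]; simp

-- the shape of a string with at least two dashes: name ++ '-' ++ mid ++ '-' ++ last
def pvS (name mid last : List Char) : List Char := name ++ '-' :: (mid ++ '-' :: last)

lemma pvS_len (name mid last : List Char) :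
    (pvS name mid last).length = name.length + 1 + mid.length + 1 + last.length := by
  simp [pvS]; omega

lemma pvS_get_m (name mid last : List Char) :
    (pvS name mid last)[name.length]? = some '-' := by
  simp [pvS]

lemma pvS_get_d1 (name mid last : List Char) :
    (pvS name mid last)[name.length + 1 + mid.length]? = some '-' := by
  unfold pvS
  rw [List.getElem?_append_right (by omega)]
  rw [show name.length + 1 + mid.length - name.length = mid.length + 1 by omega]
  rw [List.getElem?_cons_succ]
  simp

lemma getElem?_ne_dash {l : List Char} (h : '-' ∉ l) (i : Nat) : l[i]? ≠ some '-' := by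
  intro he; exact h (List.mem_of_getElem? he)

lemma pvS_get_mid (name mid last : List Char) (hm : '-' ∉ mid) (i : Nat)
    (h1 : name.length < i) (h2 : i < name.length + 1 + mid.length) :
    (pvS name mid last)[i]? ≠ some '-' := by
  unfold pvS
  rw [List.getElem?_append_right (by omega)]
  rw [show i - name.length = (i - name.length - 1) + 1 by omega]
  rw [List.getElem?_cons_succ]
  rw [List.getElem?_append_left (by omega)]
  exact getElem?_ne_dash hm _

lemma pvS_get_last (name mid last : List Char) (hl : '-' ∉ last) (i : Nat)
    (h1 : name.length + 1 + mid.length < i) :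
    (pvS name mid last)[i]? ≠ some '-' := by
  unfold pvS
  rw [List.getElem?_append_right (by omega)]
  rw [show i - name.length = (i - name.length - 1) + 1 by omega]
  rw [List.getElem?_cons_succ]
  rw [List.getElem?_append_right (by omega)]
  rw [show i - name.length - 1 - mid.length = (i - name.length - mid.length - 2) + 1 by omega]
  rw [List.getElem?_cons_succ]
  exact getElem?_ne_dash hl _

-- the minimal dash at index ≥ k, together with the value of findFrom there
lemma nextDash_exists (s : List Char) (k j0 : Nat) (hk : k ≤ s.length) (hj0 : k ≤ j0)
    (hdash : s[j0]? = some '-') :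
    ∃ j, k ≤ j ∧ j ≤ j0 ∧ s[j]? = some '-' ∧ (∀ i, k ≤ i → i < j → s[i]? ≠ some '-') ∧
      PySem.Chars.findFrom s ['-'] (k : Int) none = (j : Int) := by
  have hex : ∃ j, k ≤ j ∧ s[j]? = some '-' := ⟨j0, hj0, hdash⟩
  classical
  let j := Nat.find hex
  obtain ⟨hkj, hdj⟩ := Nat.find_spec hex
  refine ⟨j, hkj, Nat.find_min' hex ⟨hj0, hdash⟩, hdj, ?_, ?_⟩
  · intro i hki hij hdi
    exact Nat.find_min hex hij ⟨hki, hdi⟩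
  · exact findFrom_eq_of_first s k j hk hkj hdj
      (fun i hki hij hdi => Nat.find_min hex hij ⟨hki, hdi⟩)

-- the two slices taken by A at the final (fdash, sdash)
lemma slice_name (name mid last : List Char) :
    PySem.List.slice (pvS name mid last) (some 0) (some ((name.length : Nat) : Int)) = name := by
  rw [show ((0 : Int)) = ((0 : Nat) : Int) by simp]
  rw [PySem.List.slice_natCast]
  simp [pvS]

lemma slice_ver (name mid last : List Char) :
    PySem.List.slice (pvS name mid last) (some (((name.length : Nat) : Int) + 1)) none =
      mid ++ '-' :: last := by
  rw [show (((name.length : Nat) : Int) + 1) = (((name.length + 1 : Nat)) : Int) by push_cast; ring]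
  rw [PySem.List.slice_from_natCast]
  have : pvS name mid last = (name ++ ['-']) ++ (mid ++ '-' :: last) := by simp [pvS]
  rw [this, List.drop_left' (by simp)]

-- the loop ends at the last two dash positions
lemma loop_run (name mid last : List Char) (hm : '-' ∉ mid) (hl : '-' ∉ last) :
    ∀ (fuel sd : Nat) (f : Int),
      name.length + 1 + mid.length + 1 ≤ fuel + sd →
      (pvS name mid last)[sd]? = some '-' →
      (sd ≤ name.length ∨ sd = name.length + 1 + mid.length) →
      (sd = name.length + 1 + mid.length → f = (name.length : Int)) →
      getNameverLoop (pvS name mid last) fuel f (sd : Int) =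
        ((name.length : Int), ((name.length + 1 + mid.length : Nat) : Int)) := by
  intro fuel
  induction fuel with
  | zero => intro sd f hfuel _ hcase _; omega
  | succ fuel ih =>
    intro sd f hfuel hsd hcase hf
    have hcast : ((sd : Int) + 1) = (((sd + 1 : Nat)) : Int) := by push_cast; ring
    rcases hcase with hle | heq
    · -- sd ≤ name.length : there is a further dash; find it and recurse
      have hnz : sd < name.length + 1 + mid.length := by omega
      -- witness dash after sd: at name.length if sd < name.length, else at d1
      by_cases hsm : sd = name.length
      · obtain ⟨j, hkj, hjle, hdj, hmin, hff⟩ := nextDash_exists (pvS name mid last) (sd + 1)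
          (name.length + 1 + mid.length) (by rw [pvS_len]; omega) (by omega) (pvS_get_d1 ..)
        have hjeq : j = name.length + 1 + mid.length := by
          by_contra hne
          exact pvS_get_mid name mid last hm j (by omega) (by omega) hdj
        simp only [getNameverLoop, hcast, hff]
        rw [if_neg (by omega)]
        have := ih j ((sd : Int)) (by omega) hdj (Or.inr hjeq)
          (fun _ => by rw [hsm])
        rw [hjeq] at this ⊢
        exact this
      · obtain ⟨j, hkj, hjle, hdj, hmin, hff⟩ := nextDash_exists (pvS name mid last) (sd + 1)
          name.length (by rw [pvS_len]; omega) (by omega) (pvS_get_m ..)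
        simp only [getNameverLoop, hcast, hff]
        rw [if_neg (by omega)]
        exact ih j ((sd : Int)) (by omega) hdj (Or.inl hjle) (fun hjd => by omega)
    · -- sd = d1 : no dash remains; the loop stops
      have hff : PySem.Chars.findFrom (pvS name mid last) ['-'] ((sd + 1 : Nat) : Int) none = -1 := by
        apply findFrom_eq_neg_one_of_no _ _ (by rw [pvS_len]; omega)
        intro j hj
        exact pvS_get_last name mid last hl j (by omega)
      simp only [getNameverLoop, hcast, hff]
      rw [if_pos (by omega)]
      rw [hf heq, heq]

-- ===== VERDICT (by name: the statement is the Claim_ definition above) =====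
theorem get_namever_spec : Claim_equal_get_namever := by
  intro pkgp _
  unfold Spec_get_namever get_namever get_namever_alt
  dsimp only
  rcases h2 : splitLastDash pkgp.toList with _ | ⟨p, last⟩
  · -- no dash at all
    have hno : '-' ∉ pkgp.toList := splitLastDash_none h2
    rw [find_eq_neg_one_of_no _ hno]
    norm_num
  · obtain ⟨hs, hlast⟩ := splitLastDash_some h2
    rcases h1 : splitLastDash p with _ | ⟨name, mid⟩
    · -- exactly one dash
      have hnp : '-' ∉ p := splitLastDash_none h1
      have hfind : PySem.Chars.find pkgp.toList ['-'] = (p.length : Int) := by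
        apply find_eq_of_first
        · rw [hs]; simp
        · intro i hi
          rw [hs, List.getElem?_append_left hi]
          exact getElem?_ne_dash hnp i
      rw [hfind, if_neg (by omega)]
      have hcast : ((p.length : Int) + 1) = (((p.length + 1 : Nat)) : Int) := by push_cast; ring
      rw [hcast, findFrom_eq_neg_one_of_no _ _ (by rw [hs]; simp)
        (by
          intro j hj
          rw [hs, List.getElem?_append_right (by omega)]
          rw [show j - p.length = (j - p.length - 1) + 1 by omega, List.getElem?_cons_succ]
          exact getElem?_ne_dash hlast _)]
      simp [h1]
    · -- at least two dashes: the generic shape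
      obtain ⟨hp, hmid⟩ := splitLastDash_some h1
      have hsS : pkgp.toList = pvS name mid last := by
        rw [hs, hp]; simp [pvS]
      rw [hsS]
      -- first dash
      obtain ⟨j0, _, hj0le, hdj0, hmin0, _⟩ := nextDash_exists (pvS name mid last) 0
        name.length (by omega) (by omega) (pvS_get_m ..)
      have hfind : PySem.Chars.find (pvS name mid last) ['-'] = (j0 : Int) := by
        apply find_eq_of_first _ _ hdj0
        intro i hi
        exact hmin0 i (by omega) hi
      rw [hfind, if_neg (by omega)]
      -- second dash
      have hcast : ((j0 : Int) + 1) = (((j0 + 1 : Nat)) : Int) := by push_cast; ring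
      by_cases hj0m : j0 = name.length
      · obtain ⟨j1, hk1, hj1le, hdj1, hmin1, hff⟩ := nextDash_exists (pvS name mid last) (j0 + 1)
          (name.length + 1 + mid.length) (by rw [pvS_len]; omega) (by omega) (pvS_get_d1 ..)
        have hj1eq : j1 = name.length + 1 + mid.length := by
          by_contra hne
          exact pvS_get_mid name mid last hmid j1 (by omega) (by omega) hdj1
        rw [hcast, hff, if_neg (by omega)]
        rw [loop_run name mid last hmid hlast (((pvS name mid last).length) + 1) j1 ((j0 : Int))
          (by rw [pvS_len]; omega) hdj1 (Or.inr hj1eq) (fun _ => by rw [hj0m])]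
        rw [slice_name, slice_ver]
        simp [h1]
      · obtain ⟨j1, hk1, hj1le, hdj1, hmin1, hff⟩ := nextDash_exists (pvS name mid last) (j0 + 1)
          name.length (by rw [pvS_len]; omega) (by omega) (pvS_get_m ..)
        rw [hcast, hff, if_neg (by omega)]
        rw [loop_run name mid last hmid hlast (((pvS name mid last).length) + 1) j1 ((j0 : Int))
          (by rw [pvS_len]; omega) hdj1 (Or.inl hj1le) (fun h => by omega)]
        rw [slice_name, slice_ver]
        simp [h1]
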